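-- pv_equiv track=rewrite | github.com/DominikWojtanowski/Matura-informatyka | 2006 - Maj/zad_2/zad_2.py | zmodyfikowany_algorytm
-- ===== SOURCE A (Python) =====
-- from typing import List
--
-- def zmodyfikowany_algorytm(N: int) -> List[int]:
--     T = [0 for i in range(N+1)]
--
--     i = 2
--     while i < N:
--         if T[i] == 0:
--             j = 2 * i
--             while j <= N:
--                 T[j] += 1
--                 j += i
--         i += 1
--
--     return T
-- ===== SOURCE B (Python) =====
-- from typing import List
--
-- def zmodyfikowany_algorytm(N: int) -> List[int]:
--     spf = list(range(N + 1))          # spf[k] = smallest prime factor of k (k itself if prime or < 2)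
--     i = 2
--     while i * i <= N:
--         if spf[i] == i:
--             j = i * i
--             while j <= N:
--                 if spf[j] == j:
--                     spf[j] = i
--                 j += i
--         i += 1
--     T = []
--     for k in range(N + 1):
--         m = k
--         cnt = 0
--         while m > 1:
--             p = spf[m]
--             cnt += 1
--             while m % p == 0:
--                 m //= p
--         T.append(cnt - 1 if k > 1 and spf[k] == k else cnt)
--     return T
-- ===== Notes on version B (the rewrite author's own statement) =====
-- stated objective: alternative
-- what changed: Replaces the count-incrementing multiples sieve by a smallest-prime-factor table (first-write sieve bounded by sqrt(N)) followed by independent per-number factorization that chases spf and counts distinct primes, with the spf[k]==k test mapping primes to 0.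
import Mathlib
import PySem

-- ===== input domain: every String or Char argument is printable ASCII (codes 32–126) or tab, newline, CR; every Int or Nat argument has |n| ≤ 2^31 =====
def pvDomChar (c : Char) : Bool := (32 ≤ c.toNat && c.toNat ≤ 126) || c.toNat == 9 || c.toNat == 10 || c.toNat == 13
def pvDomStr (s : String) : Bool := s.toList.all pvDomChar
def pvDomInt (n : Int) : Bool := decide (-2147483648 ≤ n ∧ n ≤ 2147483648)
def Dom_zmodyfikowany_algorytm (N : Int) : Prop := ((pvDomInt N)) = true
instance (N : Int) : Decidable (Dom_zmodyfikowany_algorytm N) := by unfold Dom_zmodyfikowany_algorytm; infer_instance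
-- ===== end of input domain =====

-- B replaces A's count-incrementing multiples sieve by a smallest-prime-factor table
-- (first-write sieve bounded by sqrt(N)) followed by independent per-number factorization
-- that chases spf (objective: alternative algorithm, similar cost, not faster).
-- All list indices in A are provably in range, so pyGetD/pySetD are exact here.

-- ===== PORT A =====
-- inner while loop: 'while j <= N: T[j] += 1; j += i'; fuel bounds the iteration count (loop totality only)
def pvInnerA (fuel : Nat) (T : List Int) (j i N : Int) : List Int :=
  match fuel with
  | 0 => T
  | f + 1 =>
    if j ≤ N then
      pvInnerA f (PySem.List.pySetD T j (PySem.List.pyGetD T j 0 + 1)) (j + i) i N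
    else T

-- outer while loop: 'while i < N: if T[i] == 0: … ; i += 1'
def pvOuterA (fuel : Nat) (T : List Int) (i N : Int) : List Int :=
  match fuel with
  | 0 => T
  | f + 1 =>
    if i < N then
      pvOuterA f
        (if PySem.List.pyGetD T i 0 = 0 then pvInnerA (N.toNat + 1) T (2 * i) i N else T)
        (i + 1) N
    else T

def zmodyfikowany_algorytm (N : Int) : List Int :=
  let T := (PySem.List.pyRange 0 (N + 1) 1).map (fun _ => 0)
  pvOuterA (N.toNat + 1) T 2 N

-- ===== PORT B =====
-- spf-marking inner loop: 'while j <= N: if spf[j] == j: spf[j] = i; j += i'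
def pvSpfInner (fuel : Nat) (S : List Int) (j i N : Int) : List Int :=
  match fuel with
  | 0 => S
  | f + 1 =>
    if j ≤ N then
      pvSpfInner f
        (if PySem.List.pyGetD S j 0 = j then PySem.List.pySetD S j i else S) (j + i) i N
    else S

-- outer loop: 'while i * i <= N: if spf[i] == i: … ; i += 1'
def pvSpfOuter (fuel : Nat) (S : List Int) (i N : Int) : List Int :=
  match fuel with
  | 0 => S
  | f + 1 =>
    if i * i ≤ N then
      pvSpfOuter f
        (if PySem.List.pyGetD S i 0 = i then pvSpfInner (N.toNat + 1) S (i * i) i N else S)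
        (i + 1) N
    else S

-- inner while loop: 'while m % p == 0: m //= p'
def pvStripB (fuel : Nat) (m d : Int) : Int :=
  match fuel with
  | 0 => m
  | f + 1 =>
    if PySem.Int.mod m d = 0 then pvStripB f (PySem.Int.floordiv m d) d else m

-- factor-chasing loop: 'while m > 1: p = spf[m]; cnt += 1; strip p from m'
def pvChase (fuel : Nat) (S : List Int) (m cnt : Int) : Int :=
  match fuel with
  | 0 => cnt
  | f + 1 =>
    if m > 1 then
      pvChase f S (pvStripB (m.toNat + 1) m (PySem.List.pyGetD S m 0)) (cnt + 1)
    else cnt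

def pvCountB (S : List Int) (k : Int) : Int :=
  let c := pvChase (k.toNat + 1) S k 0
  if k > 1 ∧ PySem.List.pyGetD S k 0 = k then c - 1 else c

def zmodyfikowany_algorytm_alt (N : Int) : List Int :=
  let S := pvSpfOuter (N.toNat + 1) (PySem.List.pyRange 0 (N + 1) 1) 2 N
  (PySem.List.pyRange 0 (N + 1) 1).map (pvCountB S)

-- ===== PRECONDITION & SPEC =====
def Spec_zmodyfikowany_algorytm (N : Int) (out : List Int) : Prop := out = zmodyfikowany_algorytm_alt N
instance (N : Int) (out : List Int) : Decidable (Spec_zmodyfikowany_algorytm N out) := by unfold Spec_zmodyfikowany_algorytm; infer_instance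

-- ===== CLAIM (what is proved, stated in full; the proofs are below) =====
def Claim_equal_zmodyfikowany_algorytm : Prop := ∀ (N : Int), Dom_zmodyfikowany_algorytm N → Spec_zmodyfikowany_algorytm N (zmodyfikowany_algorytm N)


-- ===== LEMMAS AND PROOFS =====

-- the common specification: number of distinct primes p dividing k with p < k
def omegaLt (k : Nat) : Nat := ((Finset.range k).filter (fun p => Nat.Prime p ∧ p ∣ k)).card

-- all distinct primes dividing k
def omegaAll (k : Nat) : Nat := ((Finset.range (k + 1)).filter (fun p => Nat.Prime p ∧ p ∣ k)).card

-- marks placed by sieve steps 2..i-1: primes p < i dividing k with 2p ≤ k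
def msp (i k : Nat) : Nat := ((Finset.range i).filter (fun p => Nat.Prime p ∧ p ∣ k ∧ 2 * p ≤ k)).card

lemma getD_set_ite (l : List Int) (i j : Nat) (a : Int) :
    (l.set i a).getD j 0 = if i = j ∧ i < l.length then a else l.getD j 0 := by
  by_cases h1 : i = j
  · subst h1
    by_cases h2 : i < l.length
    · simp [h2, List.getD_eq_getElem?_getD]
    · simp [h2, List.getD_eq_getElem?_getD]
  · simp [h1, List.getD_eq_getElem?_getD]

-- ===== A-side: sieve correctness =====

lemma innerA_spec (fuel : Nat) : ∀ (T : List Int) (j p N : Int),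
    0 < p → 0 < j → p ∣ j → (N + 1 - j).toNat ≤ fuel → (N + 1).toNat ≤ T.length →
    (pvInnerA fuel T j p N).length = T.length ∧
    ∀ k : Nat, k < T.length → (k : Int) ≤ N →
      (pvInnerA fuel T j p N).getD k 0
        = T.getD k 0 + (if p ∣ (k : Int) ∧ j ≤ (k : Int) then 1 else 0) := by
  induction fuel with
  | zero =>
    intro T j p N hp hj hpj hfuel hT
    refine ⟨rfl, fun k hk hkN => ?_⟩
    rw [if_neg]
    · simp [pvInnerA]
    · rintro ⟨-, hjk⟩
      omega
  | succ f ih =>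
    intro T j p N hp hj hpj hfuel hT
    by_cases hjN : j ≤ N
    · have hjlen : j.toNat < T.length := by omega
      have hjlen' : j < (T.length : Int) := by omega
      have hset : PySem.List.pySetD T j (PySem.List.pyGetD T j 0 + 1)
          = T.set j.toNat (T.getD j.toNat 0 + 1) := by
        rw [PySem.List.pySetD_of_nonneg T _ (le_of_lt hj),
          PySem.List.pyGetD_eq_getElem T 0 (le_of_lt hj) hjlen',
          List.getD_eq_getElem T 0 hjlen]
      set T1 := T.set j.toNat (T.getD j.toNat 0 + 1) with hT1
      have hlen1 : T1.length = T.length := List.length_set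
      have hrec := ih T1 (j + p) p N hp (by omega) (by exact (dvd_add hpj (dvd_refl p))) (by omega)
        (by omega)
      simp only [pvInnerA, if_pos hjN, hset]
      refine ⟨by rw [hrec.1, hlen1], fun k hk hkN => ?_⟩
      rw [hrec.2 k (by omega) hkN]
      rw [hT1, getD_set_ite]
      by_cases hkj : j.toNat = k
      · have hjk : (k : Int) = j := by omega
        have hcond1 : p ∣ (k : Int) ∧ j ≤ (k : Int) := ⟨by rw [hjk]; exact hpj, le_of_eq hjk.symm⟩
        have hcond2 : ¬ (p ∣ (k : Int) ∧ j + p ≤ (k : Int)) := by rintro ⟨-, h⟩; omega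
        rw [if_pos ⟨hkj, hjlen⟩, if_pos hcond1, if_neg hcond2, hkj]
        omega
      · have hkj' : (k : Int) ≠ j := by omega
        rw [if_neg (by tauto)]
        congr 1
        by_cases hdvd : p ∣ (k : Int)
        · have : j ≤ (k : Int) ↔ j + p ≤ (k : Int) := by
            constructor
            · intro hle
              have h1 : p ∣ (k : Int) - j := dvd_sub hdvd hpj
              have h2 : (0 : Int) < (k : Int) - j := by omega
              have := Int.le_of_dvd h2 h1
              omega
            · omega
          simp [hdvd, this]
        · simp [hdvd]
    · simp only [pvInnerA, if_neg hjN]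
      refine ⟨by simp, fun k hk hkN => ?_⟩
      rw [if_neg (by rintro ⟨-, h⟩; omega)]
      omega

lemma msp_succ (q k : Nat) :
    msp (q + 1) k = msp q k + (if Nat.Prime q ∧ q ∣ k ∧ 2 * q ≤ k then 1 else 0) := by
  unfold msp
  rw [Finset.range_add_one, Finset.filter_insert]
  split_ifs with h
  · rw [Finset.card_insert_of_notMem (by simp)]
  · omega

lemma msp_self_eq_zero_iff (q : Nat) (hq : 2 ≤ q) : (msp q q = 0) ↔ Nat.Prime q := by
  unfold msp
  rw [Finset.card_eq_zero, Finset.filter_eq_empty_iff]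
  constructor
  · intro h
    by_contra hnp
    have hpos : 0 < q := by omega
    have hprime := Nat.minFac_prime (by omega : q ≠ 1)
    have hsq := Nat.minFac_sq_le_self hpos hnp
    have h2 : 2 ≤ q.minFac := hprime.two_le
    have hlt : q.minFac < q := by nlinarith [Nat.minFac_sq_le_self hpos hnp]
    exact h (Finset.mem_range.mpr hlt) ⟨hprime, Nat.minFac_dvd q, by nlinarith⟩
  · intro hprime p hp
    rintro ⟨hpp, hdvd, h2p⟩
    rcases (Nat.Prime.eq_one_or_self_of_dvd hprime p hdvd) with h | h
    · exact hpp.one_lt.ne' h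
    · subst h
      simp at hp
  
lemma outerA_spec (fuel : Nat) : ∀ (T : List Int) (i N : Int),
    2 ≤ i → (N - i).toNat < fuel → T.length = (N + 1).toNat →
    (∀ k : Nat, k < T.length → T.getD k 0 = (msp i.toNat k : Int)) →
    (pvOuterA fuel T i N).length = (N + 1).toNat ∧
    ∀ k : Nat, k < (N + 1).toNat →
      (pvOuterA fuel T i N).getD k 0 = (msp (max i.toNat N.toNat) k : Int) := by
  induction fuel with
  | zero => intro T i N hi hfuel; omega
  | succ f ih =>
    intro T i N hi hfuel hlen hinv
    by_cases hiN : i < N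
    · have hq : i.toNat < (N + 1).toNat := by omega
      have hilen : i.toNat < T.length := by omega
      have hilen' : i < (T.length : Int) := by omega
      have hread : PySem.List.pyGetD T i 0 = (msp i.toNat i.toNat : Int) := by
        rw [PySem.List.pyGetD_eq_getElem T 0 (by omega) hilen',
          ← List.getD_eq_getElem T 0 hilen]
        exact hinv i.toNat hilen
      have hmax : max i.toNat N.toNat = max (i + 1).toNat N.toNat := by omega
      by_cases hzero : PySem.List.pyGetD T i 0 = 0
      · -- i is prime: mark multiples
        have hprime : Nat.Prime i.toNat := by
          rw [← msp_self_eq_zero_iff i.toNat (by omega)]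
          have := hread ▸ hzero
          exact_mod_cast this
        have hinner := innerA_spec (N.toNat + 1) T (2 * i) i N (by omega) (by omega)
          (dvd_mul_left i 2) (by omega) (by omega)
        simp only [pvOuterA, if_pos hiN, if_pos hzero]
        have hrec := ih (pvInnerA (N.toNat + 1) T (2 * i) i N) (i + 1) N (by omega)
          (by omega) (by rw [hinner.1, hlen]) ?_
        · rw [hmax]; exact hrec
        · intro k hk
          rw [hinner.2 k (by rw [← hinner.1]; exact hk) (by rw [hinner.1, hlen] at hk; omega)]
          rw [hinv k (by rw [← hinner.1]; exact hk)]
          have hq1 : (i + 1).toNat = i.toNat + 1 := by omega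
          rw [hq1, msp_succ]
          push_cast
          congr 1
          have hcast : ((i.toNat : Int)) = i := by omega
          by_cases hdvd : i ∣ (k : Int)
          · have hdvd' : i.toNat ∣ k := by
              rw [← hcast] at hdvd
              exact_mod_cast hdvd
            by_cases h2i : 2 * i ≤ (k : Int)
            · rw [if_pos ⟨hdvd, h2i⟩, if_pos ⟨hprime, hdvd', by omega⟩]
            · rw [if_neg (by tauto), if_neg (by rintro ⟨-, -, h⟩; omega)]
          · have hdvd' : ¬ (i.toNat ∣ k) := by
              intro h
              exact hdvd (by rw [← hcast]; exact_mod_cast h)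
            rw [if_neg (by tauto), if_neg (by tauto)]
      · -- i is composite: nothing marked
        have hnprime : ¬ Nat.Prime i.toNat := by
          rw [← msp_self_eq_zero_iff i.toNat (by omega)]
          intro h
          exact hzero (by rw [hread]; exact_mod_cast h)
        simp only [pvOuterA, if_pos hiN, if_neg hzero]
        have hrec := ih T (i + 1) N (by omega) (by omega) hlen ?_
        · rw [hmax]; exact hrec
        · intro k hk
          rw [hinv k hk]
          have hq1 : (i + 1).toNat = i.toNat + 1 := by omega
          rw [hq1, msp_succ, if_neg (by tauto)]
          push_cast
          ring
    · simp only [pvOuterA, if_neg hiN]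
      have hmax : max i.toNat N.toNat = i.toNat := by omega
      refine ⟨hlen, fun k hk => ?_⟩
      rw [hmax]
      exact hinv k (by omega)

lemma msp_final (N : Int) (k : Nat) (hk : k < (N + 1).toNat) :
    msp (max 2 N.toNat) k = omegaLt k := by
  unfold msp omegaLt
  congr 1
  ext p
  simp only [Finset.mem_filter, Finset.mem_range]
  constructor
  · rintro ⟨hp, hpp, hdvd, h2p⟩
    exact ⟨by have := hpp.two_le; omega, hpp, hdvd⟩
  · rintro ⟨hp, hpp, hdvd⟩
    have h2 := hpp.two_le
    have hdup := hdvd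
    obtain ⟨t, ht⟩ := hdup
    have ht2 : 2 ≤ t := by
      rcases Nat.lt_or_ge t 2 with h | h
      · interval_cases t <;> omega
      · exact h
    have h2p : 2 * p ≤ k := by nlinarith
    exact ⟨by omega, hpp, hdvd, h2p⟩

lemma msp_two (k : Nat) : msp 2 k = 0 := by
  unfold msp
  rw [Finset.card_eq_zero, Finset.filter_eq_empty_iff]
  intro p hp
  rintro ⟨hpp, -, -⟩
  have := hpp.two_le
  simp at hp
  omega

theorem portA_correct (N : Int) :
    zmodyfikowany_algorytm N = (List.range (N + 1).toNat).map (fun k => (omegaLt k : Int)) := by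
  unfold zmodyfikowany_algorytm
  have hlen0 : ((PySem.List.pyRange 0 (N + 1) 1).map (fun _ => (0 : Int))).length = (N + 1).toNat := by
    simp [PySem.List.length_pyRange_one]
  have h0 : ∀ k : Nat, k < (N+1).toNat →
      ((PySem.List.pyRange 0 (N + 1) 1).map (fun _ => (0 : Int))).getD k 0 = 0 := by
    intro k hk
    rw [List.getD_eq_getElem _ _ (by rw [hlen0]; exact hk)]
    simp
  have houter := outerA_spec (N.toNat + 1) ((PySem.List.pyRange 0 (N + 1) 1).map (fun _ => (0 : Int)))
    2 N (le_refl 2) (by omega) hlen0 ?_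
  · apply List.ext_getElem
    · rw [houter.1]
      simp
    · intro k h1 h2
      have hk : k < (N + 1).toNat := by rw [houter.1] at h1; exact h1
      have := houter.2 k hk
      rw [List.getD_eq_getElem _ _ h1] at this
      rw [this]
      have h2N : Int.toNat 2 = 2 := rfl
      rw [h2N] at this ⊢
      rw [msp_final N k hk]
      simp
  · intro k hk
    rw [h0 k (by rw [← hlen0]; exact hk)]
    have h2N : Int.toNat 2 = 2 := rfl
    rw [h2N, msp_two]
    simp

-- ===== B-side: spf-table correctness =====

def stripN (fuel : Nat) (m d : Nat) : Nat :=
  match fuel with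
  | 0 => m
  | f + 1 => if m % d = 0 then stripN f (m / d) d else m

lemma stripB_bridge (fuel : Nat) : ∀ (m d : Nat),
    pvStripB fuel (m : Int) (d : Int) = ((stripN fuel m d : Nat) : Int) := by
  induction fuel with
  | zero => intro m d; rfl
  | succ f ih =>
    intro m d
    simp only [pvStripB, stripN, PySem.Int.mod_natCast, PySem.Int.floordiv_natCast]
    split_ifs with h1 h2 h2
    · exact ih (m / d) d
    · exact absurd (by exact_mod_cast h1) h2
    · exact absurd (by exact_mod_cast h2) h1
    · rfl

lemma strip_spec (fuel : Nat) : ∀ (m d : Nat), 2 ≤ d → 0 < m → m ≤ fuel →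
    ∃ t : Nat, m = d ^ t * stripN fuel m d ∧ ¬ d ∣ stripN fuel m d := by
  induction fuel with
  | zero => intro m d hd hm hfuel; omega
  | succ f ih =>
    intro m d hd hm hfuel
    rw [stripN]
    by_cases h : m % d = 0
    · rw [if_pos h]
      have hdvd : d ∣ m := Nat.dvd_of_mod_eq_zero h
      have hlt : m / d < m := Nat.div_lt_self hm (by omega)
      have hpos : 0 < m / d := Nat.div_pos (Nat.le_of_dvd hm hdvd) (by omega)
      obtain ⟨t, ht1, ht2⟩ := ih (m / d) d hd hpos (by omega)
      refine ⟨t + 1, ?_, ht2⟩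
      calc m = d * (m / d) := (Nat.mul_div_cancel' hdvd).symm
        _ = d * (d ^ t * stripN f (m / d) d) := by rw [← ht1]
        _ = d ^ (t + 1) * stripN f (m / d) d := by ring
    · rw [if_neg h]
      exact ⟨0, by simp, fun hd2 => h (Nat.mod_eq_zero_of_dvd hd2)⟩

lemma omegaAll_of_not_prime (k : Nat) (h : ¬ Nat.Prime k) : omegaAll k = omegaLt k := by
  unfold omegaAll omegaLt
  rw [Finset.range_add_one, Finset.filter_insert, if_neg (by rintro ⟨hp, -⟩; exact h hp)]

lemma omegaAll_of_prime (k : Nat) (h : Nat.Prime k) : omegaAll k = 1 ∧ omegaLt k = 0 := by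
  constructor
  · unfold omegaAll
    rw [show ((Finset.range (k+1)).filter (fun p => Nat.Prime p ∧ p ∣ k)) = {k} from ?_]
    · rfl
    · ext p
      simp only [Finset.mem_filter, Finset.mem_range, Finset.mem_singleton]
      constructor
      · rintro ⟨hp, hpp, hdvd⟩
        rcases (h.eq_one_or_self_of_dvd p hdvd) with h1 | h1
        · exact absurd h1 hpp.one_lt.ne'
        · exact h1
      · rintro rfl
        exact ⟨by omega, h, dvd_refl _⟩
  · unfold omegaLt
    rw [Finset.card_eq_zero, Finset.filter_eq_empty_iff]
    intro p hp
    rintro ⟨hpp, hdvd⟩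
    rcases (h.eq_one_or_self_of_dvd p hdvd) with h1 | h1
    · exact hpp.one_lt.ne' h1
    · simp at hp; omega

-- removing all copies of the prime p = minFac m from m drops omegaAll by exactly one
lemma omegaAll_strip (p t m m' : Nat) (hp : Nat.Prime p) (ht : m = p ^ t * m')
    (h1 : 1 ≤ t) (hm' : 1 ≤ m') (hnd : ¬ p ∣ m') : omegaAll m = omegaAll m' + 1 := by
  have hm'm : m' ∣ m := Dvd.intro_left _ ht.symm
  have hmpos : 0 < m := by
    rcases Nat.eq_zero_or_pos m with h | h
    · rw [h] at ht
      rcases Nat.mul_eq_zero.mp ht.symm with h2 | h2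
      · exact absurd h2 (pow_ne_zero t (by have := hp.two_le; omega))
      · omega
    · exact h
  have hpm : p ∣ m := by
    rw [ht]
    exact dvd_mul_of_dvd_left (dvd_pow_self p (by omega : t ≠ 0)) m'
  unfold omegaAll
  have hmem : ((Finset.range (m+1)).filter (fun q => Nat.Prime q ∧ q ∣ m))
      = insert p ((Finset.range (m'+1)).filter (fun q => Nat.Prime q ∧ q ∣ m')) := by
    ext q
    simp only [Finset.mem_insert, Finset.mem_filter, Finset.mem_range]
    constructor
    · rintro ⟨hq, hqp, hqdvd⟩
      by_cases hqeq : q = p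
      · exact Or.inl hqeq
      · right
        have hqm' : q ∣ m' := by
          rw [ht] at hqdvd
          rcases (Nat.Prime.dvd_mul hqp).mp hqdvd with h | h
          · exact absurd ((Nat.prime_dvd_prime_iff_eq hqp hp).mp
              (hqp.dvd_of_dvd_pow h)) hqeq
          · exact h
        exact ⟨by have := Nat.le_of_dvd (by omega) hqm'; omega, hqp, hqm'⟩
    · rintro (rfl | ⟨hq, hqp, hqdvd⟩)
      · exact ⟨by have := Nat.le_of_dvd hmpos hpm; omega, hp, hpm⟩
      · exact ⟨by have := Nat.le_of_dvd hmpos (dvd_trans hqdvd hm'm); omega, hqp,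
          dvd_trans hqdvd hm'm⟩
  rw [hmem, Finset.card_insert_of_notMem (by
    simp only [Finset.mem_filter, Finset.mem_range]
    rintro ⟨-, -, h⟩
    exact hnd h)]

-- the final contents of the spf table
def spfVal (k : Nat) : Nat := if 2 ≤ k ∧ ¬ Nat.Prime k then k.minFac else k

-- spf table contents after processing divisors 2..i-1
def spfI (i k : Nat) : Nat := if 2 ≤ k ∧ ¬ Nat.Prime k ∧ k.minFac < i then k.minFac else k

lemma minFac_lt_of_composite (k : Nat) (h2 : 2 ≤ k) (h : ¬ Nat.Prime k) : k.minFac < k := by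
  have hp := Nat.minFac_prime (by omega : k ≠ 1)
  have hle := Nat.minFac_le (by omega : 0 < k)
  rcases Nat.lt_or_ge k.minFac k with hlt | hge
  · exact hlt
  · exact absurd (by omega : k.minFac = k) (fun he => h (he ▸ hp))

lemma spfInner_spec (fuel : Nat) : ∀ (S : List Int) (j i N : Int),
    0 < i → 0 < j → i ∣ j → (N + 1 - j).toNat ≤ fuel → (N + 1).toNat ≤ S.length →
    (pvSpfInner fuel S j i N).length = S.length ∧
    ∀ k : Nat, k < S.length → (k : Int) ≤ N →
      (pvSpfInner fuel S j i N).getD k 0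
        = if i ∣ (k : Int) ∧ j ≤ (k : Int) ∧ S.getD k 0 = (k : Int) then i else S.getD k 0 := by
  induction fuel with
  | zero =>
    intro S j i N hi hj hij hfuel hS
    refine ⟨rfl, fun k hk hkN => ?_⟩
    rw [if_neg (by rintro ⟨-, h, -⟩; omega)]
    rfl
  | succ f ih =>
    intro S j i N hi hj hij hfuel hS
    by_cases hjN : j ≤ N
    · have hjlen : j.toNat < S.length := by omega
      have hjlen' : j < (S.length : Int) := by omega
      have hread : PySem.List.pyGetD S j 0 = S.getD j.toNat 0 := by
        rw [PySem.List.pyGetD_eq_getElem S 0 (le_of_lt hj) hjlen',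
          List.getD_eq_getElem S 0 hjlen]
      have hsetD : PySem.List.pySetD S j i = S.set j.toNat i :=
        PySem.List.pySetD_of_nonneg S i (le_of_lt hj)
      set S1 := if PySem.List.pyGetD S j 0 = j then PySem.List.pySetD S j i else S with hS1
      have hlen1 : S1.length = S.length := by
        rw [hS1]; split_ifs with h
        · rw [hsetD]; exact List.length_set
        · rfl
      have hS1k : ∀ k : Nat, k < S.length → (k : Int) ≠ j → S1.getD k 0 = S.getD k 0 := by
        intro k hk hkj
        rw [hS1]
        split_ifs with h
        · rw [hsetD, getD_set_ite, if_neg (by rintro ⟨h1, -⟩; omega)]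
        · rfl
      have hrec := ih S1 (j + i) i N hi (by omega) (dvd_add hij (dvd_refl i)) (by omega)
        (by omega)
      simp only [pvSpfInner, if_pos hjN]
      rw [← hS1]
      refine ⟨by rw [hrec.1, hlen1], fun k hk hkN => ?_⟩
      rw [hrec.2 k (by omega) hkN]
      by_cases hkj : (k : Int) = j
      · -- position j itself: written iff it still holds its index
        rw [if_neg (by rintro ⟨-, h, -⟩; omega)]
        have hjk : j.toNat = k := by omega
        by_cases hw : S.getD k 0 = (k : Int)
        · rw [if_pos ⟨by rw [hkj]; exact hij, le_of_eq hkj.symm, hw⟩]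
          rw [hS1]
          rw [if_pos (by rw [hread, hjk]; rw [hw]; omega), hsetD, getD_set_ite,
            if_pos ⟨hjk, hjlen⟩]
        · rw [if_neg (by rintro ⟨-, -, h⟩; exact hw h)]
          rw [hS1]
          split_ifs with h
          · rw [hread, hjk] at h
            exact absurd (by rw [h]; omega) hw
          · rfl
      · rw [hS1k k hk hkj]
        by_cases hdvd : i ∣ (k : Int)
        · have : j ≤ (k : Int) ↔ j + i ≤ (k : Int) := by
            constructor
            · intro hle
              have h1 : i ∣ (k : Int) - j := dvd_sub hdvd hij
              have h2 : (0 : Int) < (k : Int) - j := by omega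
              have := Int.le_of_dvd h2 h1
              omega
            · omega
          simp [hdvd, this]
        · simp [hdvd]
    · simp only [pvSpfInner, if_neg hjN]
      refine ⟨by simp, fun k hk hkN => ?_⟩
      rw [if_neg (by rintro ⟨-, h, -⟩; omega)]

lemma spfOuter_spec (fuel : Nat) : ∀ (S : List Int) (i N : Int),
    2 ≤ i → (N + 1 - i).toNat ≤ fuel → S.length = (N + 1).toNat →
    (∀ k : Nat, k < S.length → S.getD k 0 = (spfI i.toNat k : Int)) →
    (pvSpfOuter fuel S i N).length = (N + 1).toNat ∧
    ∀ k : Nat, k < (N + 1).toNat →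
      (pvSpfOuter fuel S i N).getD k 0 = (spfVal k : Int) := by
  induction fuel with
  | zero =>
    intro S i N hi hfuel hlen hinv
    have hiN : ¬ (i * i ≤ N) := by nlinarith [(by omega : N < i)]
    refine ⟨by simp [pvSpfOuter, hlen], fun k hk => ?_⟩
    rw [(by simp [pvSpfOuter] : pvSpfOuter 0 S i N = S), hinv k (by omega)]
    congr 1
    unfold spfI spfVal
    split_ifs with h1 h2 h2
    · rfl
    · rcases h1 with ⟨ha, hb, -⟩
      exact absurd ⟨ha, hb⟩ h2
    · -- composite k with minFac k ≥ i: impossible since minFac k ≤ k ≤ N < i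
      rcases h2 with ⟨ha, hb⟩
      have := Nat.minFac_le (by omega : 0 < k)
      exact absurd ⟨ha, hb, by omega⟩ h1
    · rfl
  | succ f ih =>
    intro S i N hi hfuel hlen hinv
    by_cases hiN : i * i ≤ N
    · have hii : i ≤ N := by nlinarith
      have hii2 : (2 : Int) ≤ i * i := by nlinarith
      set q := i.toNat with hq
      have hqi : (q : Int) = i := by omega
      have hq2 : 2 ≤ q := by omega
      have hqlen : q < S.length := by omega
      have hread : PySem.List.pyGetD S i 0 = (spfI q q : Int) := by
        rw [PySem.List.pyGetD_eq_getElem S 0 (by omega) (by omega),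
          ← List.getD_eq_getElem S 0 (by omega : i.toNat < S.length)]
        exact hinv i.toNat (by omega)
      have hmaxstep : ∀ k : Nat, Nat.Prime q → k < S.length → (k : Int) ≤ N →
          (if i ∣ (k : Int) ∧ i * i ≤ (k : Int) ∧ S.getD k 0 = (k : Int) then i else S.getD k 0)
            = (spfI (q + 1) k : Int) := by
        intro k hqprime hk hkN
        rw [hinv k hk]
        by_cases hc : 2 ≤ k ∧ ¬ Nat.Prime k ∧ k.minFac < q
        · -- already marked
          have hne : (spfI q k : Int) ≠ (k : Int) := by
            unfold spfI
            rw [if_pos hc]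
            have := minFac_lt_of_composite k hc.1 hc.2.1
            omega
          rw [if_neg (by rintro ⟨-, -, h⟩; exact hne h)]
          unfold spfI
          rw [if_pos hc, if_pos ⟨hc.1, hc.2.1, by omega⟩]
        · -- unmarked: spfI q k = k
          have hself : spfI q k = k := by unfold spfI; rw [if_neg hc]
          rw [hself]
          by_cases hm : i ∣ (k : Int) ∧ i * i ≤ (k : Int)
          · -- k is a multiple of the prime q with q² ≤ k: its minFac is exactly q
            have hqdvd : q ∣ k := by
              have := hm.1
              rw [← hqi] at this
              exact_mod_cast this
            have hqq : q * q ≤ k := by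
              have := hm.2
              rw [← hqi] at this
              exact_mod_cast this
            have hkcomp : ¬ Nat.Prime k := by
              intro hkp
              rcases (hkp.eq_one_or_self_of_dvd q hqdvd) with h | h
              · omega
              · nlinarith [hkp.two_le]
            have h2k : 2 ≤ k := by nlinarith
            have hminle : k.minFac ≤ q := Nat.minFac_le_of_dvd (by omega) hqdvd
            have hminge : ¬ k.minFac < q := fun h => hc ⟨h2k, hkcomp, h⟩
            have hmin : k.minFac = q := by omega
            rw [if_pos ⟨hm.1, hm.2, rfl⟩]
            unfold spfI
            rw [if_pos ⟨h2k, hkcomp, by omega⟩, hmin, hqi]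
          · rw [if_neg (by rintro ⟨h1, h2, -⟩; exact hm ⟨h1, h2⟩)]
            unfold spfI
            rw [if_neg (by
              rintro ⟨h2k, hkcomp, hlt⟩
              have hminge : ¬ k.minFac < q := fun h => hc ⟨h2k, hkcomp, h⟩
              have hmin : k.minFac = q := by omega
              have hqdvd : q ∣ k := hmin ▸ Nat.minFac_dvd k
              have hqq : q * q ≤ k := by
                have := Nat.minFac_sq_le_self (by omega : 0 < k) hkcomp
                rw [hmin] at this
                nlinarith
              exact hm ⟨by rw [← hqi]; exact_mod_cast hqdvd,
                by rw [← hqi]; exact_mod_cast hqq⟩)]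
      by_cases hzero : PySem.List.pyGetD S i 0 = i
      · -- q is prime: mark its multiples from q²
        have hqprime : Nat.Prime q := by
          by_contra hnp
          have hcomp : spfI q q = q.minFac := by
            unfold spfI
            rw [if_pos ⟨hq2, hnp, minFac_lt_of_composite q hq2 hnp⟩]
          rw [hread, hcomp] at hzero
          have := minFac_lt_of_composite q hq2 hnp
          omega
        have hinner := spfInner_spec (N.toNat + 1) S (i * i) i N (by omega) (by nlinarith)
          (Dvd.intro i rfl) (by omega) (by omega)
        simp only [pvSpfOuter, if_pos hiN, if_pos hzero]
        have hrec := ih (pvSpfInner (N.toNat + 1) S (i * i) i N) (i + 1) N (by omega)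
          (by omega) (by rw [hinner.1, hlen]) ?_
        · exact hrec
        · intro k hk
          rw [hinner.1] at hk
          rw [hinner.2 k hk (by omega)]
          have hq1 : (i + 1).toNat = q + 1 := by omega
          rw [hq1]
          exact hmaxstep k hqprime hk (by omega)
      · -- q is composite: no marking, spfI unchanged since minFac is never composite
        have hnprime : ¬ Nat.Prime q := by
          intro hp
          have : spfI q q = q := by
            unfold spfI
            rw [if_neg (by rintro ⟨-, h, -⟩; exact h hp)]
          rw [hread, this] at hzero
          exact hzero (by omega)
        simp only [pvSpfOuter, if_pos hiN, if_neg hzero]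
        have hrec := ih S (i + 1) N (by omega) (by omega) hlen ?_
        · exact hrec
        · intro k hk
          rw [hinv k hk]
          have hq1 : (i + 1).toNat = q + 1 := by omega
          rw [hq1]
          congr 1
          unfold spfI
          split_ifs with h1 h2 h2
          · rfl
          · rcases h1 with ⟨ha, hb, hco⟩
            exact absurd ⟨ha, hb, by omega⟩ h2
          · -- minFac k = q would make q prime
            rcases h2 with ⟨ha, hb, hco⟩
            have hnlt : ¬ k.minFac < q := fun hl => h1 ⟨ha, hb, hl⟩
            have : k.minFac = q := by omega
            exact absurd (this ▸ Nat.minFac_prime (by omega : k ≠ 1)) hnprime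
          · rfl
    · simp only [pvSpfOuter, if_neg hiN]
      refine ⟨hlen, fun k hk => ?_⟩
      rw [hinv k (by omega)]
      congr 1
      unfold spfI spfVal
      split_ifs with h1 h2 h2
      · rfl
      · rcases h1 with ⟨ha, hb, -⟩
        exact absurd ⟨ha, hb⟩ h2
      · rcases h2 with ⟨ha, hb⟩
        have hsq := Nat.minFac_sq_le_self (by omega : 0 < k) hb
        have : k.minFac * k.minFac ≤ k := by nlinarith
        have hik : (k : Int) < i * i := by omega
        have : (k.minFac : Int) < i := by nlinarith [(by exact_mod_cast this :
          ((k.minFac : Int)) * (k.minFac : Int) ≤ (k : Int)), (by omega : (0:Int) ≤ (k.minFac : Int))]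
        exact absurd ⟨ha, hb, by omega⟩ h1
      · rfl

lemma spfVal_eq_minFac (m : Nat) (hm : 2 ≤ m) : spfVal m = m.minFac := by
  unfold spfVal
  split_ifs with h
  · rfl
  · have : Nat.Prime m := by tauto
    exact (Nat.Prime.minFac_eq this).symm

lemma chase_spec (fuel : Nat) : ∀ (S : List Int) (m cnt : Nat) (N : Int),
    m ≤ fuel → S.length = (N + 1).toNat → m < S.length →
    (∀ k : Nat, k < S.length → S.getD k 0 = (spfVal k : Int)) →
    pvChase fuel S (m : Int) (cnt : Int) = (cnt : Int) + (omegaAll m : Int) := by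
  induction fuel with
  | zero =>
    intro S m cnt N hfuel hlen hm hS
    have : m = 0 := by omega
    subst this
    simp only [pvChase]
    rw [(by decide : omegaAll 0 = 0)]
    simp
  | succ f ih =>
    intro S m cnt N hfuel hlen hm hS
    by_cases hm1 : 1 < m
    · have hm1' : (1 : Int) < (m : Int) := by exact_mod_cast hm1
      simp only [pvChase, if_pos hm1']
      have hread : PySem.List.pyGetD S (m : Int) 0 = (spfVal m : Int) := by
        rw [PySem.List.pyGetD_natCast]
        rw [List.getD_eq_getElem S 0 hm, ← List.getD_eq_getElem S 0 hm]
        exact hS m hm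
      have hminf : spfVal m = m.minFac := spfVal_eq_minFac m (by omega)
      have hp := Nat.minFac_prime (by omega : m ≠ 1)
      have hp2 := hp.two_le
      rw [hread, hminf, (by omega : ((m : Int)).toNat = m), stripB_bridge (m + 1) m m.minFac]
      obtain ⟨t, ht, hnd⟩ := strip_spec (m + 1) m m.minFac hp2 (by omega) (by omega)
      set m1 := stripN (m + 1) m m.minFac with hm1def
      have hm1pos : 0 < m1 := by
        rcases Nat.eq_zero_or_pos m1 with h | h
        · rw [h, mul_zero] at ht; omega
        · exact h
      have ht1 : 1 ≤ t := by
        by_contra h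
        have : t = 0 := by omega
        rw [this, pow_zero, one_mul] at ht
        exact hnd (ht ▸ Nat.minFac_dvd m)
      have hm1dvd : m1 ∣ m := Dvd.intro_left _ ht.symm
      have hpt : 2 ≤ m.minFac ^ t := by
        calc 2 = 2 ^ 1 := rfl
          _ ≤ 2 ^ t := Nat.pow_le_pow_right (by omega) ht1
          _ ≤ m.minFac ^ t := Nat.pow_le_pow_left hp2 t
      have hm1lt : m1 < m := by nlinarith
      have hih := ih S m1 (cnt + 1) N (by omega) hlen (by omega) hS
      push_cast at hih ⊢
      rw [hih, omegaAll_strip m.minFac t m m1 hp ht ht1 (by omega) hnd]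
      push_cast
      ring
    · have hm1' : ¬ (1 : Int) < (m : Int) := by exact_mod_cast hm1
      simp only [pvChase, if_neg hm1']
      interval_cases m
      · rw [(by decide : omegaAll 0 = 0)]; simp
      · rw [(by decide : omegaAll 1 = 0)]; simp

lemma countB_eq (S : List Int) (N : Int) (k : Nat)
    (hlen : S.length = (N + 1).toNat) (hk : k < S.length)
    (hS : ∀ j : Nat, j < S.length → S.getD j 0 = (spfVal j : Int)) :
    pvCountB S (k : Int) = (omegaLt k : Int) := by
  unfold pvCountB
  have hchase : pvChase ((k : Int).toNat + 1) S (k : Int) 0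
      = (0 : Int) + (omegaAll k : Int) := by
    rw [(by omega : ((k : Int)).toNat = k)]
    exact_mod_cast chase_spec (k + 1) S k 0 N (by omega) hlen hk hS
  have hread : PySem.List.pyGetD S (k : Int) 0 = (spfVal k : Int) := by
    rw [PySem.List.pyGetD_natCast]
    exact hS k hk
  rw [hchase, hread]
  by_cases hk2 : 2 ≤ k
  · by_cases hkp : Nat.Prime k
    · have hkk : spfVal k = k := by unfold spfVal; rw [if_neg (by rintro ⟨-, h⟩; exact h hkp)]
      rw [if_pos ⟨by exact_mod_cast hk2, by rw [hkk]⟩]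
      obtain ⟨ha, hb⟩ := omegaAll_of_prime k hkp
      rw [ha, hb]
      simp
    · have hkk : spfVal k ≠ k := by
        rw [spfVal_eq_minFac k hk2]
        have := minFac_lt_of_composite k hk2 hkp
        omega
      rw [if_neg (by
        rintro ⟨-, h⟩
        exact hkk (by exact_mod_cast h))]
      rw [omegaAll_of_not_prime k hkp]
      simp
  · interval_cases k
    · decide
    · decide

theorem portB_correct (N : Int) :
    zmodyfikowany_algorytm_alt N = (List.range (N + 1).toNat).map (fun k => (omegaLt k : Int)) := by
  unfold zmodyfikowany_algorytm_alt
  have hlen0 : (PySem.List.pyRange 0 (N + 1) 1).length = (N + 1).toNat := by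
    simp [PySem.List.length_pyRange_one]
  have h0 : ∀ k : Nat, k < (PySem.List.pyRange 0 (N + 1) 1).length →
      (PySem.List.pyRange 0 (N + 1) 1).getD k 0 = (spfI 2 k : Int) := by
    intro k hkl
    rw [List.getD_eq_getElem _ _ hkl, PySem.List.getElem_pyRange_one]
    have hspf : spfI 2 k = k := by
      unfold spfI
      rw [if_neg (by
        rintro ⟨h2k, hnp, hlt⟩
        have := (Nat.minFac_prime (by omega : k ≠ 1)).two_le
        omega)]
    rw [hspf]
    simp
  have houter := spfOuter_spec (N.toNat + 1) (PySem.List.pyRange 0 (N + 1) 1) 2 N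
    (le_refl 2) (by omega) hlen0 (by
      intro k hk
      rw [(by rfl : (2 : Int).toNat = 2)]
      exact h0 k hk)
  set S := pvSpfOuter (N.toNat + 1) (PySem.List.pyRange 0 (N + 1) 1) 2 N with hSdef
  have hSlen : S.length = (N + 1).toNat := houter.1
  have hSk : ∀ j : Nat, j < S.length → S.getD j 0 = (spfVal j : Int) := by
    intro j hj
    exact houter.2 j (by omega)
  rw [PySem.List.pyRange_one, List.map_map]
  simp only [sub_zero]
  apply List.map_congr_left
  intro k hk
  simp only [Function.comp_apply, zero_add]
  exact countB_eq S N k hSlen (by rw [hSlen]; exact (by simpa using List.mem_range.mp hk)) hSk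

-- ===== VERDICT (by name: the statement is the Claim_ definition above) =====
theorem zmodyfikowany_algorytm_spec : Claim_equal_zmodyfikowany_algorytm := by
  intro N _
  unfold Spec_zmodyfikowany_algorytm
  rw [portA_correct, portB_correct]
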